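-- pv_equiv track=rewrite | github.com/Kang-kyunghun/codekata | programmers/programmers_201207.py | solution
-- ===== SOURCE A (Python) =====
-- import itertools
--
-- def solution(clothes):
--     hash_table = {}
--     total = 0
--     for hash_input in clothes:
--         try:
--             hash_table[hash_input[1]].append(hash_input[0])
--         except KeyError:
--             hash_table[hash_input[1]] = [hash_input[0]]
--     hash_values = list(hash_table.values())
--
--     for count_case in range(1, len(hash_values)+1):
--         result = list(itertools.combinations(hash_values, count_case))
--         for i in result:
--             caselist = list(itertools.product(*i))
--             total += len(caselist)
--     return total
-- ===== SOURCE B (Python) =====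
-- def solution(clothes):
--     counts = {}
--     for name, cat in clothes:
--         counts[cat] = counts.get(cat, 0) + 1
--     total = 1
--     for c in counts.values():
--         total *= c + 1
--     return total - 1
-- ===== Notes on version B (the rewrite author's own statement) =====
-- stated objective: faster
-- what changed: Replaces the enumeration of all combinations of categories and the materialisation of every cartesian product with a single counting pass and the closed form prod(category_size+1)-1.
import Mathlib
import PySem

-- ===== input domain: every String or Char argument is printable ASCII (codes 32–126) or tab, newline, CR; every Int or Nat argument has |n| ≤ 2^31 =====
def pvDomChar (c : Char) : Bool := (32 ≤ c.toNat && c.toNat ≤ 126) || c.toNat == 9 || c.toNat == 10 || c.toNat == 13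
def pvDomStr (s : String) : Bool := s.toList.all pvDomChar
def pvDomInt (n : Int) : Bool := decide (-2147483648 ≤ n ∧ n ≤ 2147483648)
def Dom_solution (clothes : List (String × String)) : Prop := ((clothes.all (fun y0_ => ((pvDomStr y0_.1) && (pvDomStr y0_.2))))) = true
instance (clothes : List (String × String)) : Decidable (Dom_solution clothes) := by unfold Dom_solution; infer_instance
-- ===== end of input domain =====

-- B replaces A's enumeration of every combination of categories and every cartesian
-- product by the closed form prod(category_size + 1) - 1 computed in one counting pass (faster).

-- ===== PORT A =====
-- itertools.combinations(xs, k) (as a list of k-element selections, in Python's order)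
def pvCombos {α : Type} (k : Nat) (xs : List α) : List (List α) :=
  match k, xs with
  | 0, _ => [[]]
  | _ + 1, [] => []
  | k + 1, x :: rest => ((pvCombos k rest).map (fun c => x :: c)) ++ pvCombos (k + 1) rest

-- list(itertools.product(*ls))
def pvProduct {α : Type} (ls : List (List α)) : List (List α) :=
  match ls with
  | [] => [[]]
  | l :: rest => l.flatMap (fun x => (pvProduct rest).map (fun c => x :: c))

def solution (clothes : List (String × String)) : Int :=
  -- try: append / except KeyError: new singleton == d[k] = d.get(k, []) + [v], key position kept
  let hash_table : PySem.Dict String (List String) :=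
    clothes.foldl (fun d p => d.modify p.2 [] (fun v => v ++ [p.1])) PySem.Dict.empty
  let hash_values := hash_table.values
  (PySem.List.pyRange 1 ((hash_values.length : Int) + 1) 1).foldl
    (fun total count_case =>
      (pvCombos count_case.toNat hash_values).foldl
        (fun t i => t + ((pvProduct i).length : Int)) total)
    0

-- ===== PORT B =====
def solution_alt (clothes : List (String × String)) : Int :=
  let counts : PySem.Dict String Int :=
    clothes.foldl (fun d p => d.insert p.2 (d.getD p.2 0 + 1)) PySem.Dict.empty
  (counts.values.foldl (fun total c => total * (c + 1)) 1) - 1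

-- ===== PRECONDITION & SPEC =====
def Spec_solution (clothes : List (String × String)) (out : Int) : Prop := out = solution_alt clothes
instance (clothes : List (String × String)) (out : Int) : Decidable (Spec_solution clothes out) := by unfold Spec_solution; infer_instance

-- ===== CLAIM (what is proved, stated in full; the proofs are below) =====
def Claim_equal_solution : Prop := ∀ (clothes : List (String × String)), Dom_solution clothes → Spec_solution clothes (solution clothes)

-- ===== LEMMAS AND PROOFS =====

-- product of the lengths of the members of c
def pvProdLen {α : Type} (c : List (List α)) : Int :=
  c.foldr (fun l a => (l.length : Int) * a) 1

theorem pvProduct_length {α : Type} (ls : List (List α)) :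
    ((pvProduct ls).length : Int) = pvProdLen ls := by
  induction ls with
  | nil => rfl
  | cons l rest ih =>
      simp [pvProduct, pvProdLen, List.length_flatMap] at *
      simp [ih, mul_comm]

-- sum of pvProdLen over the k-combinations
def pvS {α : Type} (xs : List (List α)) (k : Nat) : Int :=
  ((pvCombos k xs).map pvProdLen).sum

theorem pvCombos_eq_nil {α : Type} (xs : List (List α)) (k : Nat) (h : xs.length < k) :
    pvCombos k xs = [] := by
  induction xs generalizing k with
  | nil => cases k with | zero => omega | succ k => rfl
  | cons x rest ih =>
      cases k with
      | zero => omega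
      | succ k =>
          simp [pvCombos]
          constructor
          · exact ih k (by simpa using Nat.lt_of_succ_lt_succ h)
          · exact ih (k+1) (by simp at h; omega)

theorem pvS_zero {α : Type} (xs : List (List α)) : pvS xs 0 = 1 := by
  simp [pvS, pvCombos, pvProdLen]

theorem pvS_succ_cons {α : Type} (x : List α) (xs : List (List α)) (k : Nat) :
    pvS (x :: xs) (k + 1) = (x.length : Int) * pvS xs k + pvS xs (k + 1) := by
  simp only [pvS, pvCombos, List.map_append, List.sum_append, List.map_map]
  have h : (pvProdLen ∘ fun c => x :: c) = (fun c : List (List α) => (x.length : Int) * pvProdLen c) := by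
    funext c; simp [pvProdLen]
  rw [h, List.sum_map_mul_left]

-- total over k = 0 .. n-1
def pvT {α : Type} (xs : List (List α)) (n : Nat) : Int :=
  ((List.range n).map (pvS xs)).sum

theorem pvT_succ_left {α : Type} (xs : List (List α)) (n : Nat) :
    pvT xs (n + 1) = pvS xs 0 + ((List.range n).map (fun k => pvS xs (k + 1))).sum := by
  unfold pvT
  rw [List.range_succ_eq_map, List.map_cons, List.map_map, List.sum_cons]
  congr 1

theorem pvT_closed {α : Type} (xs : List (List α)) :
    pvT xs (xs.length + 1) = (xs.map (fun l => (l.length : Int) + 1)).prod := by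
  induction xs with
  | nil => simp [pvT, pvS_zero]
  | cons x rest ih =>
      have hlen : pvS rest (rest.length + 1) = 0 := by
        simp [pvS, pvCombos_eq_nil rest (rest.length + 1) (by omega)]
      have hsplit : pvT (x :: rest) (rest.length + 2) = 1 +
          ((List.range (rest.length + 1)).map
            (fun k => (x.length : Int) * pvS rest k + pvS rest (k + 1))).sum := by
        rw [show rest.length + 2 = (rest.length + 1) + 1 from rfl, pvT_succ_left, pvS_zero]
        congr 1
        congr 1
        apply List.map_congr_left
        intro k _
        exact pvS_succ_cons x rest k
      have h1 : ((List.range (rest.length + 1)).map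
            (fun k => (x.length : Int) * pvS rest k + pvS rest (k + 1))).sum
          = (x.length : Int) * pvT rest (rest.length + 1) +
            ((List.range (rest.length + 1)).map (fun k => pvS rest (k + 1))).sum := by
        simp [pvT, ← List.sum_map_mul_left, List.sum_map_add]
      have h3 : pvT rest (rest.length + 2) = pvT rest (rest.length + 1) := by
        simp [pvT, List.range_succ (n := rest.length + 1), hlen]
      have h4 : pvT rest (rest.length + 2) = 1 +
          ((List.range (rest.length + 1)).map (fun k => pvS rest (k + 1))).sum := by
        rw [show rest.length + 2 = (rest.length + 1) + 1 from rfl, pvT_succ_left, pvS_zero]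
      have h2 : ((List.range (rest.length + 1)).map (fun k => pvS rest (k + 1))).sum
          = pvT rest (rest.length + 1) - 1 := by linarith
      have : pvT (x :: rest) ((x :: rest).length + 1) = pvT (x :: rest) (rest.length + 2) := by
        simp
      rw [this, hsplit, h1, h2, ih]
      simp; ring

theorem solution_eq_prod (clothes : List (String × String)) :
    solution clothes =
      (let vals := (clothes.foldl (fun d p => d.modify p.2 [] (fun v => v ++ [p.1]))
          (PySem.Dict.empty : PySem.Dict String (List String))).values
       (vals.map (fun l => (l.length : Int) + 1)).prod - 1) := by
  unfold solution
  dsimp only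
  set vals := (clothes.foldl (fun d p => d.modify p.2 [] (fun v => v ++ [p.1]))
      (PySem.Dict.empty : PySem.Dict String (List String))).values with hv
  -- inner foldl adds pvS, outer foldl over pyRange 1 (n+1)
  have hinner : ∀ (k : Nat) (t : Int),
      (pvCombos k vals).foldl (fun t i => t + ((pvProduct i).length : Int)) t = t + pvS vals k := by
    intro k t
    have : ∀ (cs : List (List (List String))) (t : Int),
        cs.foldl (fun t i => t + ((pvProduct i).length : Int)) t = t + (cs.map pvProdLen).sum := by
      intro cs
      induction cs with
      | nil => simp
      | cons c rest ih =>
          intro t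
          rw [List.foldl_cons, ih]
          simp [pvProduct_length]
          ring
    exact this _ t
  have main : ∀ (n : Nat) (t : Int),
      (PySem.List.pyRange 1 ((n : Int) + 1) 1).foldl
        (fun total count_case => (pvCombos count_case.toNat vals).foldl
          (fun t i => t + ((pvProduct i).length : Int)) total) t
      = t + ((List.range n).map (fun k => pvS vals (k + 1))).sum := by
    intro n
    induction n with
    | zero =>
        intro t
        rw [show ((0 : Nat) : Int) + 1 = 1 by norm_num, PySem.List.pyRange_one_eq_nil (le_refl 1)]
        simp
    | succ m ih =>
        intro t
        have hle : (1 : Int) ≤ (m : Int) + 1 := by omega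
        rw [show (((m + 1 : Nat)) : Int) + 1 = ((m : Int) + 1) + 1 by push_cast; ring,
           PySem.List.pyRange_one_succ_right hle]
        rw [List.foldl_append, ih]
        simp only [List.foldl_cons, List.foldl_nil]
        rw [show ((m : Int) + 1).toNat = m + 1 by omega, hinner]
        rw [List.range_succ, List.map_append, List.sum_append]
        simp
        ring
  rw [main]
  have hS0 : ((List.range vals.length).map (fun k => pvS vals (k + 1))).sum
      = pvT vals (vals.length + 1) - 1 := by
    have hsplit : pvT vals (vals.length + 1)
        = pvS vals 0 + ((List.range vals.length).map (fun k => pvS vals (k + 1))).sum :=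
      pvT_succ_left vals vals.length
    rw [pvS_zero] at hsplit
    linarith
  rw [hS0, pvT_closed]
  simp

-- the category multiset seen by both programs
theorem values_lengths (clothes : List (String × String)) :
    ((clothes.foldl (fun d p => d.modify p.2 [] (fun v => v ++ [p.1]))
        (PySem.Dict.empty : PySem.Dict String (List String))).values).map (fun l => (l.length : Int))
    = (clothes.foldl (fun d p => d.insert p.2 (d.getD p.2 0 + 1))
        (PySem.Dict.empty : PySem.Dict String Int)).values := by
  -- rewrite both loops as loops over the swapped / projected lists
  have hA : clothes.foldl (fun d p => d.modify p.2 [] (fun v => v ++ [p.1]))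
        (PySem.Dict.empty : PySem.Dict String (List String))
      = (clothes.map (fun p => (p.2, p.1))).foldl (fun d p => d.modify p.1 [] (fun v => v ++ [p.2]))
        PySem.Dict.empty := by
    rw [List.foldl_map]
  have hB : clothes.foldl (fun d p => d.insert p.2 (d.getD p.2 0 + 1))
        (PySem.Dict.empty : PySem.Dict String Int)
      = (clothes.map (·.2)).foldl (fun d x => d.insert x (d.getD x 0 + 1)) PySem.Dict.empty := by
    rw [List.foldl_map]
  rw [hA, hB, PySem.Dict.foldl_insert_getD_add_one_eq_counter]
  set sw := clothes.map (fun p => (p.2, p.1)) with hsw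
  have hcats : sw.map (·.1) = clothes.map (·.2) := by simp [hsw, List.map_map, Function.comp]
  -- A's dict: keys and per-key values
  have hndA : (sw.foldl (fun d p => d.modify p.1 [] (fun v => v ++ [p.2]))
      (PySem.Dict.empty : PySem.Dict String (List String))).keys.Nodup := by
    exact PySem.Dict.nodup_keys_foldl_modify_key sw (·.1) [] _ PySem.Dict.empty
      (by simp)
  have hkA : (sw.foldl (fun d p => d.modify p.1 [] (fun v => v ++ [p.2]))
      (PySem.Dict.empty : PySem.Dict String (List String))).keys
      = PySem.Set.ofList (clothes.map (·.2)) := by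
    rw [← hcats]
    have := PySem.Dict.keys_foldl_modify_key (l := sw) (key := (·.1))
      (d0 := ([] : List String)) (f := fun d p => fun v => v ++ [p.2]) (d := PySem.Dict.empty)
    simp only [PySem.Dict.keys_empty] at this
    rw [this]
    rfl
  rw [PySem.Dict.values_eq_map_keys _ hndA [], hkA]
  rw [PySem.Dict.values_eq_map_keys _ (by simp) (0 : Int)]
  rw [PySem.Dict.keys_counter]
  rw [List.map_map]
  apply List.map_congr_left
  intro c _
  simp only [Function.comp]
  rw [PySem.Dict.getD_foldl_modify_append, PySem.Dict.getD_counter]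
  simp [PySem.Dict.getD_empty, hsw, List.count_eq_countP, List.filter_map,
    List.countP_eq_length_filter]
  congr 1

-- ===== VERDICT (by name: the statement is the Claim_ definition above) =====
theorem solution_spec : Claim_equal_solution := by
  intro clothes _
  unfold Spec_solution solution_alt
  rw [solution_eq_prod]
  dsimp only
  rw [← values_lengths clothes]
  congr 1
  rw [List.prod_eq_foldl]
  simp [List.foldl_map]
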